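-- pv_equiv track=rewrite | github.com/iaraski/mas-wrestling-backend | app/routers/live.py | _round_robin_rounds_with_bye_priority_from_participants
-- ===== SOURCE A (Python) =====
-- def _round_robin_rounds_with_bye_priority_from_participants(participants: list[str | None]):
--     n = len(participants)
--     if n < 2:
--         return []
--
--     bye_added = any(p is None for p in participants)
--     rounds: list[list[tuple[str, str]]] = []
--     last_round_bye: str | None = None
--
--     for _round_idx in range(n - 1):
--         pairs: list[tuple[str | None, str | None]] = []
--         bye_athlete: str | None = None
--
--         for j in range(n // 2):
--             a = participants[j]
--             b = participants[n - 1 - j]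
--             if a is None and b is None:
--                 continue
--             if a is None or b is None:
--                 bye_athlete = a if a is not None else b
--                 continue
--             pairs.append((a, b))
--
--         if last_round_bye:
--             for i, (a, b) in enumerate(pairs):
--                 if a == last_round_bye or b == last_round_bye:
--                     if b == last_round_bye:
--                         pairs[i] = (b, a)
--                     pairs.insert(0, pairs.pop(i))
--                     break
--
--         rounds.append([(a, b) for a, b in pairs])
--         last_round_bye = bye_athlete if bye_added else None
--
--         participants = [participants[0]] + [participants[-1]] + participants[1:-1]
--
--     return rounds
-- ===== SOURCE B (Python) =====
-- def _round_robin_rounds_with_bye_priority_from_participants(participants):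
--     n = len(participants)
--     if n < 2:
--         return []
--     bye_added = any(p is None for p in participants)
--     m = n - 1
--
--     # Stateless circle method: position i of round r maps to an ORIGINAL index by a
--     # closed-form modular formula; no list is ever rotated or rebuilt, and the carried
--     # "last round's bye" state is replaced by recomputing the previous round's bye.
--     def slot(r, i):
--         return 0 if i == 0 else 1 + (i - 1 - r) % m
--
--     def raw_pairs(r):
--         return [(participants[slot(r, j)], participants[slot(r, n - 1 - j)])
--                 for j in range(n // 2)]
--
--     def bye_of(r):
--         bye = None
--         for a, b in raw_pairs(r):
--             if (a is None) != (b is None):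
--                 bye = a if a is not None else b
--         return bye
--
--     def round_pairs(r):
--         pairs = [(a, b) for a, b in raw_pairs(r) if a is not None and b is not None]
--         lrb = bye_of(r - 1) if (bye_added and r > 0) else None
--         if lrb:
--             hit = next((i for i, p in enumerate(pairs) if lrb in p), None)
--             if hit is not None:
--                 a, b = pairs[hit]
--                 pairs = [(b, a) if b == lrb else (a, b)] + pairs[:hit] + pairs[hit + 1:]
--         return pairs
--
--     return [round_pairs(r) for r in range(m)]
-- ===== Notes on version B (the rewrite author's own statement) =====
-- stated objective: alternative
-- what changed: B computes each round independently as a map over round numbers using a closed-form modular index formula (slot(r,i)) into the ORIGINAL participants list, never rotating or rebuilding any list, and replaces A's carried last_round_bye loop state by recomputing the previous round's bye directly from the formula; the bye-match promotion is a functional find-index rebuild instead of A's enumerate/pop/insert mutation.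
import Mathlib
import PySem

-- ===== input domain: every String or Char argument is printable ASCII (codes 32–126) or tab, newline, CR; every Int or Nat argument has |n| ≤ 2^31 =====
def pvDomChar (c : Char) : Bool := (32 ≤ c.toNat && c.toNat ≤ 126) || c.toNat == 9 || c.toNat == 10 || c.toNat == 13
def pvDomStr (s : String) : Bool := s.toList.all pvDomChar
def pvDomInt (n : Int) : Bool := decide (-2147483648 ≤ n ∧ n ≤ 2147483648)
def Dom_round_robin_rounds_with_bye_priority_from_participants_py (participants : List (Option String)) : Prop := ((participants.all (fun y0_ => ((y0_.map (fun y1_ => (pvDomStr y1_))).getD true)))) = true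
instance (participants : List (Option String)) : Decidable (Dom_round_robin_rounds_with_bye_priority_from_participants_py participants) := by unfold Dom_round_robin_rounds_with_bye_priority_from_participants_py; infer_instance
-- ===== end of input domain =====

-- B computes each round independently via a closed-form modular index formula into the
-- original list (no rotation, no carried bye state, functional reorder) — objective: alternative.

-- ===== PORT A =====
-- inner j-loop over range(n // 2): state = (pairs, bye_athlete)
def pvA_inner (ps : List (Option String)) (n : Nat) : List (String × String) × Option String :=
  (List.range (n / 2)).foldl
    (fun (st : List (String × String) × Option String) j =>
      match ps.getD j none, ps.getD (n - 1 - j) none with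
      | none, none => st
      | some a', none => (st.1, some a')
      | none, some b' => (st.1, some b')
      | some a', some b' => (st.1 ++ [(a', b')], st.2))
    ([], none)

-- the enumerate/pop/insert/break scan of A
def pvA_scan (s : String) (acc : List (String × String)) : List (String × String) → List (String × String)
  | [] => acc
  | (a, b) :: t =>
    if a = s ∨ b = s then
      (if b = s then (b, a) else (a, b)) :: (acc ++ t)
    else pvA_scan s (acc ++ [(a, b)]) t

-- `if last_round_bye:` is Python truthiness: none and "" skip
def pvA_reorder (lrb : Option String) (pairs : List (String × String)) : List (String × String) :=
  match lrb with
  | none => pairs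
  | some s => if s = "" then pairs else pvA_scan s [] pairs

-- the round loop; new participants = [p[0]] + [p[-1]] + p[1:-1]
def pvA_loop (byeAdded : Bool) (n : Nat) :
    Nat → List (Option String) → Option String → List (List (String × String)) → List (List (String × String))
  | 0, _, _, rounds => rounds
  | k + 1, ps, lrb, rounds =>
    let pb := pvA_inner ps n
    let pairs := pvA_reorder lrb pb.1
    let ps' := ps.take 1 ++ ps.drop (ps.length - 1) ++ (ps.drop 1).dropLast
    pvA_loop byeAdded n k ps' (if byeAdded then pb.2 else none) (rounds ++ [pairs])

def round_robin_rounds_with_bye_priority_from_participants_py (participants : List (Option String)) : List (List (String × String)) :=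
  let n := participants.length
  if n < 2 then []
  else
    pvA_loop (participants.any (fun p => p.isNone)) n (n - 1) participants none []

-- ===== PORT B =====
-- slot(r, i): the original index at position i of round r (Python % with positive modulus = emod)
def pvB_slot (r m i : Nat) : Nat :=
  if i = 0 then 0 else 1 + ((((i : Int) - 1 - (r : Int)) % (m : Int))).toNat

def pvB_rawPairs (ps : List (Option String)) (n r : Nat) : List (Option String × Option String) :=
  (List.range (n / 2)).map (fun j =>
    (ps.getD (pvB_slot r (n - 1) j) none, ps.getD (pvB_slot r (n - 1) (n - 1 - j)) none))

-- bye_of(r): the last one-sided pair's athlete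
def pvB_byeOf (ps : List (Option String)) (n r : Nat) : Option String :=
  (pvB_rawPairs ps n r).foldl
    (fun (bye : Option String) ab =>
      match ab with
      | (some a, none) => some a
      | (none, some b) => some b
      | _ => bye) none

-- functional reorder: find the hit index, rebuild [head] + pairs[:i] + pairs[i+1:]
def pvB_reorder (lrb : Option String) (pairs : List (String × String)) : List (String × String) :=
  match lrb with
  | none => pairs
  | some s =>
    if s = "" then pairs
    else
      match pairs.findIdx? (fun p => p.1 == s || p.2 == s) with
      | none => pairs
      | some i =>
        let p := pairs.getD i ("", "")
        (if p.2 = s then (p.2, p.1) else p) :: (pairs.take i ++ pairs.drop (i + 1))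

def pvB_roundPairs (byeAdded : Bool) (ps : List (Option String)) (n r : Nat) : List (String × String) :=
  let pairs := (pvB_rawPairs ps n r).filterMap (fun ab =>
    match ab with
    | (some a, some b) => some (a, b)
    | _ => none)
  let lrb := if byeAdded = true ∧ 0 < r then pvB_byeOf ps n (r - 1) else none
  pvB_reorder lrb pairs

def round_robin_rounds_with_bye_priority_from_participants_py_alt (participants : List (Option String)) : List (List (String × String)) :=
  let n := participants.length
  if n < 2 then []
  else
    let byeAdded := participants.any (fun p => p.isNone)
    (List.range (n - 1)).map (pvB_roundPairs byeAdded participants n)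

-- ===== PRECONDITION & SPEC =====
def Spec_round_robin_rounds_with_bye_priority_from_participants_py (participants : List (Option String)) (out : List (List (String × String))) : Prop := out = round_robin_rounds_with_bye_priority_from_participants_py_alt participants
instance (participants : List (Option String)) (out : List (List (String × String))) : Decidable (Spec_round_robin_rounds_with_bye_priority_from_participants_py participants out) := by unfold Spec_round_robin_rounds_with_bye_priority_from_participants_py; infer_instance

-- ===== CLAIM (what is proved, stated in full; the proofs are below) =====
def Claim_equal_round_robin_rounds_with_bye_priority_from_participants_py : Prop := ∀ (participants : List (Option String)), Dom_round_robin_rounds_with_bye_priority_from_participants_py participants → Spec_round_robin_rounds_with_bye_priority_from_participants_py participants (round_robin_rounds_with_bye_priority_from_participants_py participants)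

-- ===== LEMMAS AND PROOFS =====

-- A's round-r arrangement, written explicitly
def pvArr (first : Option String) (rest : List (Option String)) (m r : Nat) : List (Option String) :=
  first :: (rest.drop (m - r) ++ rest.take (m - r))

theorem pv_arr_getD (first : Option String) (rest : List (Option String)) (m r i : Nat)
    (hm : rest.length = m) (hr : r ≤ m) (hi : i ≤ m) :
    (pvArr first rest m r).getD i none = (first :: rest).getD (pvB_slot r m i) none := by
  cases i with
  | zero => simp [pvArr, pvB_slot]
  | succ t =>
    have hm1 : 1 ≤ m := by omega
    have htm : t < m := by omega
    have hmod : ((((t : Int) + 1 - 1 - (r : Int)) % (m : Int))).toNat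
        = if t < r then m - r + t else t - r := by
      by_cases h : t < r
      · have he : ((t : Int) + 1 - 1 - (r : Int)) = ((t : Int) - r + m) + m * (-1) := by ring
        rw [he, Int.add_mul_emod_self_left,
            Int.emod_eq_of_lt (by omega) (by omega)]
        simp only [if_pos h]; omega
      · rw [Int.emod_eq_of_lt (by omega) (by omega)]
        simp only [if_neg h]; omega
    have hdl : (rest.drop (m - r)).length = r := by simp [hm]; omega
    simp only [pvArr, pvB_slot, if_neg (Nat.succ_ne_zero t), List.getD_cons_succ]
    push_cast
    rw [hmod]
    by_cases h : t < r
    · simp only [if_pos h]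
      rw [show 1 + (m - r + t) = (m - r + t) + 1 from by omega, List.getD_cons_succ]
      rw [List.getD_eq_getElem?_getD, List.getD_eq_getElem?_getD,
          List.getElem?_append_left (by rw [hdl]; omega), List.getElem?_drop]
    · simp only [if_neg h]
      rw [show 1 + (t - r) = (t - r) + 1 from by omega, List.getD_cons_succ]
      rw [List.getD_eq_getElem?_getD, List.getD_eq_getElem?_getD,
          List.getElem?_append_right (by rw [hdl]; omega), hdl, List.getElem?_take,
          if_pos (by omega)]

-- the single fold of A's inner loop splits into B's filterMap + bye fold
theorem pv_inner_fold (ps : List (Option String)) (n : Nat) (L : List Nat) :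
    ∀ (acc : List (String × String)) (bye : Option String),
    L.foldl
      (fun (st : List (String × String) × Option String) j =>
        match ps.getD j none, ps.getD (n - 1 - j) none with
        | none, none => st
        | some a', none => (st.1, some a')
        | none, some b' => (st.1, some b')
        | some a', some b' => (st.1 ++ [(a', b')], st.2))
      (acc, bye)
    = (acc ++ (L.map (fun j => (ps.getD j none, ps.getD (n - 1 - j) none))).filterMap
          (fun ab => match ab with | (some a, some b) => some (a, b) | _ => none),
       (L.map (fun j => (ps.getD j none, ps.getD (n - 1 - j) none))).foldl
          (fun (bye : Option String) ab =>
            match ab with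
            | (some a, none) => some a
            | (none, some b) => some b
            | _ => bye) bye) := by
  induction L with
  | nil => intro acc bye; simp
  | cons j t ih =>
    intro acc bye
    simp only [List.foldl_cons, List.map_cons, List.filterMap_cons]
    rcases h1 : ps.getD j none with _ | a <;> rcases h2 : ps.getD (n - 1 - j) none with _ | b <;>
      simp only [h1, h2] <;> rw [ih] <;> simp

theorem pv_inner_eq (first : Option String) (rest : List (Option String)) (n m r : Nat)
    (hm : rest.length = m) (hn : n = m + 1) (hr : r ≤ m) :
    pvA_inner (pvArr first rest m r) n
      = ((pvB_rawPairs (first :: rest) n r).filterMap (fun ab =>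
          match ab with
          | (some a, some b) => some (a, b)
          | _ => none),
         pvB_byeOf (first :: rest) n r) := by
  have hraw : pvB_rawPairs (first :: rest) n r
      = (List.range (n / 2)).map (fun j =>
          ((pvArr first rest m r).getD j none, (pvArr first rest m r).getD (n - 1 - j) none)) := by
    unfold pvB_rawPairs
    refine List.map_congr_left ?_
    intro j hj
    have hj' := List.mem_range.mp hj
    rw [show n - 1 = m from by omega]
    rw [← pv_arr_getD first rest m r j hm hr (by omega),
        ← pv_arr_getD first rest m r (m - j) hm hr (by omega)]
  unfold pvA_inner pvB_byeOf
  rw [pv_inner_fold, hraw]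
  simp

theorem pv_scan_eq (s : String) (l : List (String × String)) : ∀ acc,
    pvA_scan s acc l
      = match l.findIdx? (fun p => p.1 == s || p.2 == s) with
        | none => acc ++ l
        | some i =>
          (if (l.getD i ("", "")).2 = s then ((l.getD i ("", "")).2, (l.getD i ("", "")).1)
           else l.getD i ("", "")) :: (acc ++ l.take i ++ l.drop (i + 1)) := by
  induction l with
  | nil => intro acc; simp [pvA_scan]
  | cons hd t ih =>
    intro acc
    obtain ⟨a, b⟩ := hd
    rw [List.findIdx?_cons]
    by_cases hab : a = s ∨ b = s
    · have : ((a, b).1 == s || (a, b).2 == s) = true := by simp; tauto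
      rw [this]
      simp only [pvA_scan, if_pos hab]
      simp
    · have : ((a, b).1 == s || (a, b).2 == s) = false := by simp; tauto
      rw [this]
      simp only [pvA_scan, if_neg hab]
      rw [ih (acc ++ [(a, b)])]
      cases hf : t.findIdx? (fun p => p.1 == s || p.2 == s) with
      | none => simp
      | some i => simp

theorem pv_reorder_eq (lrb : Option String) (pairs : List (String × String)) :
    pvA_reorder lrb pairs = pvB_reorder lrb pairs := by
  cases lrb with
  | none => rfl
  | some s =>
    unfold pvA_reorder pvB_reorder
    by_cases hs : s = ""
    · simp [hs]
    · simp only [if_neg hs]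
      rw [pv_scan_eq s pairs []]
      cases hf : pairs.findIdx? (fun p => p.1 == s || p.2 == s) with
      | none => simp
      | some i => simp

theorem pv_rot1 (t : List (Option String)) (k : Nat) (h1 : 1 ≤ k) (h2 : k ≤ t.length) :
    (t.drop k ++ t.take k).drop (t.length - 1) ++ (t.drop k ++ t.take k).take (t.length - 1)
      = t.drop (k - 1) ++ t.take (k - 1) := by
  apply List.ext_getElem
  · simp; omega
  · intro i hA hB
    simp only [List.getElem_append, List.getElem_take, List.getElem_drop,
               List.length_drop, List.length_take, List.length_append] at *
    split_ifs <;> (congr 1; omega)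

theorem pv_rebuild (f : Option String) (t : List (Option String)) (k : Nat)
    (h1 : 1 ≤ k) (h2 : k ≤ t.length) :
    (f :: (t.drop k ++ t.take k)).take 1
      ++ (f :: (t.drop k ++ t.take k)).drop ((f :: (t.drop k ++ t.take k)).length - 1)
      ++ ((f :: (t.drop k ++ t.take k)).drop 1).dropLast
      = f :: (t.drop (k - 1) ++ t.take (k - 1)) := by
  have hu : (t.drop k ++ t.take k).length = t.length := by simp; omega
  have hdrop : (f :: (t.drop k ++ t.take k)).drop ((f :: (t.drop k ++ t.take k)).length - 1)
      = (t.drop k ++ t.take k).drop (t.length - 1) := by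
    rw [List.length_cons, hu, show t.length + 1 - 1 = (t.length - 1) + 1 from by omega,
        List.drop_succ_cons]
  rw [hdrop]
  have hdl : ((f :: (t.drop k ++ t.take k)).drop 1).dropLast
      = (t.drop k ++ t.take k).take (t.length - 1) := by
    simp [List.dropLast_eq_take, hu]
  rw [hdl]
  simp only [List.take_succ_cons, List.take_zero, List.cons_append, List.nil_append]
  rw [pv_rot1 t k h1 h2]

theorem pv_loop_eq (byeAdded : Bool) (first : Option String) (rest : List (Option String))
    (n m : Nat) (hm : rest.length = m) (hn : n = m + 1) :
    ∀ k r, k + r = m → ∀ rounds,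
      pvA_loop byeAdded n k (pvArr first rest m r)
        (if byeAdded = true ∧ 0 < r then pvB_byeOf (first :: rest) n (r - 1) else none) rounds
        = rounds ++ (List.range' r k).map (pvB_roundPairs byeAdded (first :: rest) n) := by
  intro k
  induction k with
  | zero => intro r hr rounds; simp [pvA_loop]
  | succ k ih =>
    intro r hr rounds
    have hrm : r < m := by omega
    rw [List.range'_succ]
    simp only [List.map_cons, pvA_loop]
    rw [pv_inner_eq first rest n m r hm hn (by omega)]
    simp only [pv_reorder_eq]
    have hlen : (pvArr first rest m r).length = n := by simp [pvArr, hm]; omega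
    rw [hlen]
    have harr : (pvArr first rest m r).take 1
        ++ (pvArr first rest m r).drop (n - 1)
        ++ ((pvArr first rest m r).drop 1).dropLast = pvArr first rest m (r + 1) := by
      have h := pv_rebuild first rest (m - r) (by omega) (by omega)
      unfold pvArr
      rw [show n - 1 = (first :: (rest.drop (m - r) ++ rest.take (m - r))).length - 1 from by
            simp [hm]; omega]
      rw [h, show m - r - 1 = m - (r + 1) from by omega]
    rw [harr]
    have hnext : (if byeAdded = true then pvB_byeOf (first :: rest) n r else none)
        = (if byeAdded = true ∧ 0 < r + 1 then pvB_byeOf (first :: rest) n (r + 1 - 1) else none) := by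
      by_cases hb : byeAdded = true <;> simp [hb]
    rw [hnext, ih (r + 1) (by omega) (rounds ++ [_])]
    have hpair : pvB_reorder
          (if byeAdded = true ∧ 0 < r then pvB_byeOf (first :: rest) n (r - 1) else none)
          ((pvB_rawPairs (first :: rest) n r).filterMap (fun ab =>
            match ab with
            | (some a, some b) => some (a, b)
            | _ => none))
        = pvB_roundPairs byeAdded (first :: rest) n r := rfl
    rw [hpair]
    simp

-- ===== VERDICT (by name: the statement is the Claim_ definition above) =====
theorem round_robin_rounds_with_bye_priority_from_participants_py_spec : Claim_equal_round_robin_rounds_with_bye_priority_from_participants_py := by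
  intro participants _
  unfold Spec_round_robin_rounds_with_bye_priority_from_participants_py
  unfold round_robin_rounds_with_bye_priority_from_participants_py
    round_robin_rounds_with_bye_priority_from_participants_py_alt
  by_cases h2 : participants.length < 2
  · simp [h2]
  · simp only [if_neg h2]
    cases participants with
    | nil => simp at h2
    | cons first rest =>
      simp only [List.length_cons, Nat.add_sub_cancel, List.range_eq_range']
      have h := pv_loop_eq ((first :: rest).any (fun p => p.isNone)) first rest
        (rest.length + 1) rest.length rfl rfl rest.length 0 (by omega) []
      have harr0 : pvArr first rest rest.length 0 = first :: rest := by
        simp [pvArr]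
      rw [harr0] at h
      simp only [Nat.lt_irrefl, and_false, if_false, List.nil_append] at h
      exact h
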